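-- pv_equiv track=rewrite | github.com/bonzanni/casa-ha-app | casa-agent/rootfs/opt/casa/hooks.py | _rm_has_recursive_and_force
-- ===== SOURCE A (Python) =====
-- def _rm_has_recursive_and_force(argv: list[str]) -> bool:
--     """True iff `rm` argv contains both a recursive AND a force flag.
--
--     Recognises -r / -R / --recursive and -f / --force in any order, and
--     short-flag clusters (-rf, -fr, -rfv, -rfd, -fRv, ...).
--     """
--     has_recursive = False
--     has_force = False
--     for arg in argv[1:]:
--         if arg == "--":
--             break  # everything after -- is positional
--         if arg in ("--recursive",):
--             has_recursive = True
--         elif arg == "--force":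
--             has_force = True
--         elif arg.startswith("--"):
--             continue
--         elif arg.startswith("-") and len(arg) > 1:
--             for ch in arg[1:]:
--                 if ch in ("r", "R"):
--                     has_recursive = True
--                 elif ch == "f":
--                     has_force = True
--     return has_recursive and has_force
-- ===== SOURCE B (Python) =====
-- def _is_recursive_flag(arg: str) -> bool:
--     if arg == "--recursive":
--         return True
--     if arg.startswith("--") or not arg.startswith("-") or len(arg) <= 1:
--         return False
--     return any(ch in ("r", "R") for ch in arg[1:])
--
--
-- def _is_force_flag(arg: str) -> bool:
--     if arg == "--force":
--         return True
--     if arg.startswith("--") or not arg.startswith("-") or len(arg) <= 1: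
--         return False
--     return any(ch == "f" for ch in arg[1:])
--
--
-- def _rm_has_recursive_and_force(argv: list[str]) -> bool:
--     rest = argv[1:]
--     if "--" in rest:
--         rest = rest[: rest.index("--")]
--     return any(_is_recursive_flag(a) for a in rest) and any(_is_force_flag(a) for a in rest)
-- ===== Notes on version B (the rewrite author's own statement) =====
-- stated objective: simpler
-- what changed: Replaces the fused stateful loop (two mutable flags updated across branches, nested char loop, break at '--') with a declarative decomposition: slice the argv prefix before the first '--' once, then test it with two independent pure predicates via any().
import Mathlib
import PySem

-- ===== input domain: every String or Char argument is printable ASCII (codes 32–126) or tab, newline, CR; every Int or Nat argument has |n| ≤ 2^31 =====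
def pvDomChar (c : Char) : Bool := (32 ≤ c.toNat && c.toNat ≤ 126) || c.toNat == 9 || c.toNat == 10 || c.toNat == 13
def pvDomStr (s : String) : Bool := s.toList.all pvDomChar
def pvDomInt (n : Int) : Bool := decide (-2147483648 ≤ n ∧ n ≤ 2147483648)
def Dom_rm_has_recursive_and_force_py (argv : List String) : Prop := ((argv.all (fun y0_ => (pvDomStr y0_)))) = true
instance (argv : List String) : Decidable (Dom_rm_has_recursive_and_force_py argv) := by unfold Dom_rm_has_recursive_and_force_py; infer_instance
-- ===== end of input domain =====

-- B replaces A's fused stateful loop (two mutable flags, nested char loop, break at "--")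
-- with a simpler decomposition: slice the prefix before the first "--" once, then test it
-- with two independent pure predicates (any/any).

-- ===== PORT A =====
-- inner 'for ch in arg[1:]' loop, carrying (has_recursive, has_force)
def pvCharLoop : List Char → Bool → Bool → Bool × Bool
  | [], hr, hf => (hr, hf)
  | c :: rest, hr, hf =>
    if c = 'r' ∨ c = 'R' then pvCharLoop rest true hf
    else if c = 'f' then pvCharLoop rest hr true
    else pvCharLoop rest hr hf

-- 'for arg in argv[1:]' loop with the break at "--"
def pvArgLoop : List String → Bool → Bool → Bool
  | [], hr, hf => hr && hf
  | a :: rest, hr, hf =>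
    if a = "--" then hr && hf
    else if a = "--recursive" then pvArgLoop rest true hf
    else if a = "--force" then pvArgLoop rest hr true
    else if PySem.Str.startswith a "--" then pvArgLoop rest hr hf
    else if PySem.Str.startswith a "-" ∧ PySem.Str.len a > 1 then
      let st := pvCharLoop (PySem.List.slice a.toList (some 1) none) hr hf
      pvArgLoop rest st.1 st.2
    else pvArgLoop rest hr hf

def rm_has_recursive_and_force_py (argv : List String) : Bool :=
  pvArgLoop (PySem.List.slice argv (some 1) none) false false

-- ===== PORT B =====
def pvIsRecursiveFlag (a : String) : Bool :=
  if a = "--recursive" then true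
  else if PySem.Str.startswith a "--" ∨ ¬ PySem.Str.startswith a "-" ∨ PySem.Str.len a ≤ 1 then false
  else (PySem.List.slice a.toList (some 1) none).any (fun c => c == 'r' || c == 'R')

def pvIsForceFlag (a : String) : Bool :=
  if a = "--force" then true
  else if PySem.Str.startswith a "--" ∨ ¬ PySem.Str.startswith a "-" ∨ PySem.Str.len a ≤ 1 then false
  else (PySem.List.slice a.toList (some 1) none).any (fun c => c == 'f')

def rm_has_recursive_and_force_py_alt (argv : List String) : Bool :=
  let rest := PySem.List.slice argv (some 1) none
  let rest2 := match PySem.List.index? rest "--" with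
    | some i => PySem.List.slice rest none (some (i : Int))
    | none => rest
  rest2.any pvIsRecursiveFlag && rest2.any pvIsForceFlag

-- ===== PRECONDITION & SPEC =====
def Spec_rm_has_recursive_and_force_py (argv : List String) (out : Bool) : Prop := out = rm_has_recursive_and_force_py_alt argv
instance (argv : List String) (out : Bool) : Decidable (Spec_rm_has_recursive_and_force_py argv out) := by unfold Spec_rm_has_recursive_and_force_py; infer_instance

-- ===== CLAIM (what is proved, stated in full; the proofs are below) =====
def Claim_equal_rm_has_recursive_and_force_py : Prop := ∀ (argv : List String), Dom_rm_has_recursive_and_force_py argv → Spec_rm_has_recursive_and_force_py argv (rm_has_recursive_and_force_py argv)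

-- ===== LEMMAS AND PROOFS =====

-- B's index?/slice truncation computes the prefix before the first "--"
theorem pvCut_eq_takeWhile (l : List String) :
    (match PySem.List.index? l "--" with
      | some i => PySem.List.slice l none (some (i : Int))
      | none => l) = l.takeWhile (fun s => s != "--") := by
  induction l with
  | nil => simp [PySem.List.index?]
  | cons a l ih =>
    by_cases h : a = "--"
    · subst h
      simp only [PySem.List.index?_cons_self]
      rw [PySem.List.slice_to_natCast]
      simp
    · rw [PySem.List.index?_cons_of_ne l h]
      cases hidx : PySem.List.index? l "--" with
      | none =>
        rw [hidx] at ih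
        simp [h, ← ih]
      | some i =>
        rw [hidx] at ih
        simp only [Option.map_some]
        rw [PySem.List.slice_to_natCast, List.take_succ_cons, List.takeWhile_cons]
        simp only at ih
        simp [h, ← ih, PySem.List.slice_to_natCast]

-- A's inner char loop = or-ing in the two char predicates of B
theorem pvCharLoop_eq (cs : List Char) : ∀ (hr hf : Bool),
    pvCharLoop cs hr hf =
      (hr || cs.any (fun c => c == 'r' || c == 'R'), hf || cs.any (fun c => c == 'f')) := by
  induction cs with
  | nil => intro hr hf; simp [pvCharLoop]
  | cons c rest ih =>
    intro hr hf
    by_cases h1 : c = 'r' ∨ c = 'R'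
    · have e1 : (c == 'r' || c == 'R') = true := by
        rcases h1 with h | h <;> subst h <;> decide
      have e2 : (c == 'f') = false := by
        rcases h1 with h | h <;> subst h <;> decide
      simp [pvCharLoop, h1, ih, e1, e2]
    · have e1 : (c == 'r' || c == 'R') = false := by
        rcases not_or.mp h1 with ⟨hr1, hr2⟩
        simp [hr1, hr2]
      by_cases h2 : c = 'f'
      · subst h2
        simp [pvCharLoop, ih]
      · have e2 : (c == 'f') = false := by simp [h2]
        simp [pvCharLoop, h1, h2, ih, e1, e2]

-- A's outer loop = B's two any-scans over the takeWhile prefix, seeded with (hr, hf)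
theorem pvArgLoop_eq (l : List String) : ∀ (hr hf : Bool),
    pvArgLoop l hr hf =
      ((hr || (l.takeWhile (fun s => s != "--")).any pvIsRecursiveFlag) &&
       (hf || (l.takeWhile (fun s => s != "--")).any pvIsForceFlag)) := by
  induction l with
  | nil => intro hr hf; simp [pvArgLoop]
  | cons a rest ih =>
    intro hr hf
    by_cases h1 : a = "--"
    · subst h1; simp [pvArgLoop]
    · have hne : (a != "--") = true := by simp [bne_iff_ne, h1]
      rw [List.takeWhile_cons]
      simp only [hne, if_true]
      by_cases h2 : a = "--recursive"
      · subst h2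
        have er : pvIsRecursiveFlag "--recursive" = true := by decide
        have ef : pvIsForceFlag "--recursive" = false := by decide
        simp [pvArgLoop, ih, er, ef]
      · by_cases h3 : a = "--force"
        · subst h3
          have er : pvIsRecursiveFlag "--force" = false := by decide
          have ef : pvIsForceFlag "--force" = true := by decide
          simp [pvArgLoop, h1, ih, er, ef]
        · by_cases h4 : PySem.Str.startswith a "--"
          · have hcond : (PySem.Str.startswith a "--" ∨ ¬ PySem.Str.startswith a "-" ∨ PySem.Str.len a ≤ 1) := Or.inl h4
            have er : pvIsRecursiveFlag a = false := by
              unfold pvIsRecursiveFlag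
              rw [if_neg h2, if_pos hcond]
            have ef : pvIsForceFlag a = false := by
              unfold pvIsForceFlag
              rw [if_neg h3, if_pos hcond]
            unfold pvArgLoop
            rw [if_neg h1, if_neg h2, if_neg h3, if_pos h4, ih]
            simp [er, ef]
          · by_cases h5 : PySem.Str.startswith a "-" ∧ PySem.Str.len a > 1
            · have hcond : ¬ (PySem.Str.startswith a "--" ∨ ¬ PySem.Str.startswith a "-" ∨ PySem.Str.len a ≤ 1) := by
                rintro (hc | hc | hc)
                · exact h4 hc
                · exact hc h5.1
                · omega
              have er : pvIsRecursiveFlag a =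
                  (PySem.List.slice a.toList (some 1) none).any (fun c => c == 'r' || c == 'R') := by
                unfold pvIsRecursiveFlag
                rw [if_neg h2, if_neg hcond]
              have ef : pvIsForceFlag a =
                  (PySem.List.slice a.toList (some 1) none).any (fun c => c == 'f') := by
                unfold pvIsForceFlag
                rw [if_neg h3, if_neg hcond]
              unfold pvArgLoop
              rw [if_neg h1, if_neg h2, if_neg h3, if_neg h4, if_pos h5]
              simp only [pvCharLoop_eq]
              rw [ih]
              simp only [List.any_cons, er, ef, Bool.or_assoc]
            · have hcond : (PySem.Str.startswith a "--" ∨ ¬ PySem.Str.startswith a "-" ∨ PySem.Str.len a ≤ 1) := by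
                by_cases hsw : PySem.Str.startswith a "-"
                · right; right
                  rcases not_and.mp h5 hsw with h
                  omega
                · right; left; exact hsw
              have er : pvIsRecursiveFlag a = false := by
                unfold pvIsRecursiveFlag
                rw [if_neg h2, if_pos hcond]
              have ef : pvIsForceFlag a = false := by
                unfold pvIsForceFlag
                rw [if_neg h3, if_pos hcond]
              simp only [pvArgLoop, if_neg h1, if_neg h2, if_neg h3, if_neg h4, if_neg h5]
              rw [ih]
              simp [er, ef]

-- ===== VERDICT (by name: the statement is the Claim_ definition above) =====
theorem rm_has_recursive_and_force_py_spec : Claim_equal_rm_has_recursive_and_force_py := by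
  intro argv _
  unfold Spec_rm_has_recursive_and_force_py rm_has_recursive_and_force_py rm_has_recursive_and_force_py_alt
  change pvArgLoop (PySem.List.slice argv (some 1) none) false false =
    ((match PySem.List.index? (PySem.List.slice argv (some 1) none) "--" with
      | some i => PySem.List.slice (PySem.List.slice argv (some 1) none) none (some (i : Int))
      | none => PySem.List.slice argv (some 1) none).any pvIsRecursiveFlag &&
     (match PySem.List.index? (PySem.List.slice argv (some 1) none) "--" with
      | some i => PySem.List.slice (PySem.List.slice argv (some 1) none) none (some (i : Int))
      | none => PySem.List.slice argv (some 1) none).any pvIsForceFlag)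
  rw [pvArgLoop_eq, pvCut_eq_takeWhile]
  simp
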